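-- pv_equiv track=rewrite | github.com/ucfcbb/RNAMotifProfile | simplified_loopcut_helper.py | get_aln_mapping
-- ===== SOURCE A (Python) =====
-- def get_aln_mapping(aln_seq1, aln_seq2):
--     """
--     :return ret1: dict[i]->j  i in seq1; j in seq2
--     :return ret2: dict[j]->i  j in seq2; i in seq1
--     """
--     if len(aln_seq1) != len(aln_seq2):
--         return None
--
--     i = j = 0
--
--     ret1 = {}
--     ret2 = {}
--     for k in list(range(len(aln_seq1))):
--         if aln_seq1[k] == "-" and aln_seq2[k] != "-":
--             j += 1
--         elif aln_seq2[k] == "-" and aln_seq1[k] != "-":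
--             i += 1
--         elif aln_seq1[k] != "-" and aln_seq2[k] != "-":
--             ret1[i] = j
--             ret2[j] = i
--             i += 1
--             j += 1
--
--     return ret1, ret2
-- ===== SOURCE B (Python) =====
-- def _prefix_counts(s):
--     """exclusive prefix counts of non-gap characters: out[k] = #non-'-' among s[:k]"""
--     out = [0]
--     for c in s:
--         out.append(out[-1] + (1 if c != '-' else 0))
--     return out
--
--
-- def get_aln_mapping(aln_seq1, aln_seq2):
--     if len(aln_seq1) != len(aln_seq2):
--         return None
--     n = len(aln_seq1)
--     i_of = _prefix_counts(aln_seq1)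
--     j_of = _prefix_counts(aln_seq2)
--     cols = [k for k in range(n) if aln_seq1[k] != '-' and aln_seq2[k] != '-']
--     ret1 = {i_of[k]: j_of[k] for k in cols}
--     ret2 = {j_of[k]: i_of[k] for k in cols}
--     return ret1, ret2
-- ===== Notes on version B (the rewrite author's own statement) =====
-- stated objective: alternative
-- what changed: A's single fused loop carrying two running counters and both dicts is replaced by a build-index-tables decomposition: two exclusive prefix-count arrays of non-gap characters, a list of matched columns, and two dict comprehensions over those tables.
import Mathlib
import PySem

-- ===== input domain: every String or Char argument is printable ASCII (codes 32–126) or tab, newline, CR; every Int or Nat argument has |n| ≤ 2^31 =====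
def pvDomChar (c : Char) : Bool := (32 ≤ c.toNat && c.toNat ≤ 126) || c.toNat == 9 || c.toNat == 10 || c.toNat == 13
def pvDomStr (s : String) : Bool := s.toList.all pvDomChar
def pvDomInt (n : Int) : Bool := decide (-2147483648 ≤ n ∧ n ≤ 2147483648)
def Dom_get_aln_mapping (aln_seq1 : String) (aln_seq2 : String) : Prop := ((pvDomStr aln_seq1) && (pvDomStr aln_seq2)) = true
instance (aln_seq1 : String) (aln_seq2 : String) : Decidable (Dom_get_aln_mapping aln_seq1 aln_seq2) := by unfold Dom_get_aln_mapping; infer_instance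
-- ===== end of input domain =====

-- B replaces A's fused counter-carrying loop by prefix-count index tables plus a matched-column pass (alternative decomposition, same O(n) cost).

-- ===== PORT A =====
-- A's loop body: state (i, j, ret1, ret2), one aligned column (c1, c2)
def pvStepA (st : Int × Int × PySem.Dict Int Int × PySem.Dict Int Int) (c : Char × Char) :
    Int × Int × PySem.Dict Int Int × PySem.Dict Int Int :=
  let (i, j, r1, r2) := st
  if c.1 = '-' ∧ c.2 ≠ '-' then (i, j + 1, r1, r2)
  else if c.2 = '-' ∧ c.1 ≠ '-' then (i + 1, j, r1, r2)
  else if c.1 ≠ '-' ∧ c.2 ≠ '-' then (i + 1, j + 1, r1.insert i j, r2.insert j i)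
  else (i, j, r1, r2)

def get_aln_mapping (aln_seq1 : String) (aln_seq2 : String) :
    Option ((List (Int × Int)) × (List (Int × Int))) :=
  if PySem.Str.len aln_seq1 ≠ PySem.Str.len aln_seq2 then none
  else
    let l1 := aln_seq1.toList
    let l2 := aln_seq2.toList
    let st := (PySem.List.pyRange 0 (PySem.Str.len aln_seq1) 1).foldl
      (fun st k => pvStepA st (PySem.List.pyGetD l1 k ' ', PySem.List.pyGetD l2 k ' '))
      (0, 0, PySem.Dict.empty, PySem.Dict.empty)
    some (st.2.2.1.items, st.2.2.2.items)

-- ===== PORT B =====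
-- Source B's _prefix_counts: out[k] = number of non-gap characters among s[:k]
def pvPrefixCounts (l : List Char) : List Int :=
  l.foldl (fun out c => out ++ [PySem.List.pyGetD out (-1) 0 + (if c ≠ '-' then 1 else 0)]) [0]

def get_aln_mapping_alt (aln_seq1 : String) (aln_seq2 : String) :
    Option ((List (Int × Int)) × (List (Int × Int))) :=
  if PySem.Str.len aln_seq1 ≠ PySem.Str.len aln_seq2 then none
  else
    let l1 := aln_seq1.toList
    let l2 := aln_seq2.toList
    let i_of := pvPrefixCounts l1
    let j_of := pvPrefixCounts l2
    let cols := (PySem.List.pyRange 0 (PySem.Str.len aln_seq1) 1).filter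
      (fun k => decide (PySem.List.pyGetD l1 k ' ' ≠ '-') && decide (PySem.List.pyGetD l2 k ' ' ≠ '-'))
    let r1 := cols.foldl
      (fun (d : PySem.Dict Int Int) k => d.insert (PySem.List.pyGetD i_of k 0) (PySem.List.pyGetD j_of k 0))
      PySem.Dict.empty
    let r2 := cols.foldl
      (fun (d : PySem.Dict Int Int) k => d.insert (PySem.List.pyGetD j_of k 0) (PySem.List.pyGetD i_of k 0))
      PySem.Dict.empty
    some (r1.items, r2.items)

-- ===== PRECONDITION & SPEC =====
def Spec_get_aln_mapping (aln_seq1 : String) (aln_seq2 : String) (out : Option ((List (Int × Int)) × (List (Int × Int)))) : Prop := out = get_aln_mapping_alt aln_seq1 aln_seq2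
instance (aln_seq1 : String) (aln_seq2 : String) (out : Option ((List (Int × Int)) × (List (Int × Int)))) : Decidable (Spec_get_aln_mapping aln_seq1 aln_seq2 out) := by unfold Spec_get_aln_mapping; infer_instance

-- ===== CLAIM (what is proved, stated in full; the proofs are below) =====
def Claim_equal_get_aln_mapping : Prop := ∀ (aln_seq1 : String) (aln_seq2 : String), Dom_get_aln_mapping aln_seq1 aln_seq2 → Spec_get_aln_mapping aln_seq1 aln_seq2 (get_aln_mapping aln_seq1 aln_seq2)

-- ===== LEMMAS AND PROOFS =====

-- the list of (i, j) index pairs produced at the matched (both non-gap) columns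
def pvMatched : List (Char × Char) → Int → Int → List (Int × Int)
  | [], _, _ => []
  | (c1, c2) :: t, i, j =>
    if c1 = '-' ∧ c2 ≠ '-' then pvMatched t i (j + 1)
    else if c2 = '-' ∧ c1 ≠ '-' then pvMatched t (i + 1) j
    else if c1 ≠ '-' ∧ c2 ≠ '-' then (i, j) :: pvMatched t (i + 1) (j + 1)
    else pvMatched t i j

-- number of non-gap characters of a list, as an Int
def pvCnt (l : List Char) : Int := (l.countP (fun c => decide (c ≠ '-')) : Int)

theorem pvCnt_cons (c : Char) (l : List Char) :
    pvCnt (c :: l) = (if c ≠ '-' then 1 else 0) + pvCnt l := by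
  by_cases h : c = '-'
  · simp [pvCnt, h]
  · simp only [pvCnt, List.countP_cons, h, ne_eq, not_false_iff, decide_true, if_true]
    push_cast
    omega

theorem pvCnt_append_singleton (l : List Char) (c : Char) :
    pvCnt (l ++ [c]) = pvCnt l + (if c ≠ '-' then 1 else 0) := by
  by_cases h : c = '-'
  · simp [pvCnt, List.countP_append, h]
  · simp only [pvCnt, List.countP_append, List.countP_cons, List.countP_nil, h, ne_eq,
      not_false_iff, decide_true, if_true]
    push_cast
    omega

theorem pvMatched_bounds (z : List (Char × Char)) (i j : Int) (p : Int × Int)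
    (hp : p ∈ pvMatched z i j) : i ≤ p.1 ∧ j ≤ p.2 := by
  induction z generalizing i j with
  | nil => simp [pvMatched] at hp
  | cons c t ih =>
    obtain ⟨c1, c2⟩ := c
    simp only [pvMatched] at hp
    split_ifs at hp with h1 h2 h3
    · have := ih i (j+1) hp; omega
    · have := ih (i+1) j hp; omega
    · rcases List.mem_cons.mp hp with rfl | hm
      · simp
      · have := ih (i+1) (j+1) hm; omega
    · exact ih i j hp

theorem pvMatched_pairwise (z : List (Char × Char)) (i j : Int) :
    (pvMatched z i j).Pairwise (fun p q => p.1 < q.1 ∧ p.2 < q.2) := by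
  induction z generalizing i j with
  | nil => simp [pvMatched]
  | cons c t ih =>
    obtain ⟨c1, c2⟩ := c
    simp only [pvMatched]
    split_ifs with h1 h2 h3
    · exact ih i (j+1)
    · exact ih (i+1) j
    · refine List.Pairwise.cons ?_ (ih (i+1) (j+1))
      intro q hq
      have := pvMatched_bounds _ _ _ _ hq
      constructor <;> simp <;> omega
    · exact ih i j

-- A's loop, characterised: it appends exactly the matched pairs to both dicts
theorem pvA_items (z : List (Char × Char)) (i j : Int) (r1 r2 : PySem.Dict Int Int)
    (h1 : ∀ k ∈ r1.keys, k < i) (h2 : ∀ k ∈ r2.keys, k < j)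
    (n1 : r1.keys.Nodup) (n2 : r2.keys.Nodup) :
    (z.foldl pvStepA (i, j, r1, r2)).2.2.1.items = r1.items ++ pvMatched z i j
    ∧ (z.foldl pvStepA (i, j, r1, r2)).2.2.2.items = r2.items ++ (pvMatched z i j).map (fun p => (p.2, p.1)) := by
  induction z generalizing i j r1 r2 with
  | nil => simp [pvMatched]
  | cons c t ih =>
    obtain ⟨c1, c2⟩ := c
    simp only [List.foldl_cons, pvStepA, pvMatched]
    split_ifs with hc1 hc2 hc3
    · exact ih i (j+1) r1 r2 h1 (fun k hk => by have := h2 k hk; omega) n1 n2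
    · exact ih (i+1) j r1 r2 (fun k hk => by have := h1 k hk; omega) h2 n1 n2
    · have hf1 : r1.contains i = false := by
        by_contra h
        rw [Bool.not_eq_false, PySem.Dict.contains_iff_mem_keys] at h
        have := h1 i h; omega
      have hf2 : r2.contains j = false := by
        by_contra h
        rw [Bool.not_eq_false, PySem.Dict.contains_iff_mem_keys] at h
        have := h2 j h; omega
      have hk1 : (r1.insert i j).keys = r1.keys ++ [i] := PySem.Dict.keys_insert_of_not_contains r1 j hf1
      have hk2 : (r2.insert j i).keys = r2.keys ++ [j] := PySem.Dict.keys_insert_of_not_contains r2 i hf2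
      have := ih (i+1) (j+1) (r1.insert i j) (r2.insert j i)
        (by intro k hk; rw [hk1] at hk; rcases List.mem_append.mp hk with h | h
            · have := h1 k h; omega
            · simp at h; omega)
        (by intro k hk; rw [hk2] at hk; rcases List.mem_append.mp hk with h | h
            · have := h2 k h; omega
            · simp at h; omega)
        (PySem.Dict.nodup_keys_insert r1 i j n1) (PySem.Dict.nodup_keys_insert r2 j i n2)
      rw [this.1, this.2, PySem.Dict.items_insert_of_not_contains r1 j hf1,
          PySem.Dict.items_insert_of_not_contains r2 i hf2]
      simp
    · exact ih i j r1 r2 h1 h2 n1 n2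

-- Source B's prefix-count array, characterised
theorem pvPrefixCounts_eq (l : List Char) :
    pvPrefixCounts l = (List.range (l.length + 1)).map (fun m => pvCnt (l.take m)) := by
  induction l using List.reverseRecOn with
  | nil => simp [pvPrefixCounts, pvCnt]
  | append_singleton l c ih =>
    have step : pvPrefixCounts (l ++ [c])
        = pvPrefixCounts l ++ [PySem.List.pyGetD (pvPrefixCounts l) (-1) 0 + (if c ≠ '-' then 1 else 0)] := by
      simp [pvPrefixCounts, List.foldl_append]
    rw [step, ih]
    conv_lhs => rw [List.range_succ, List.map_append, List.map_singleton,
      PySem.List.pyGetD_neg_one_append_singleton, List.take_length]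
    have hlen : (l ++ [c]).length + 1 = (l.length + 1) + 1 := by simp
    rw [hlen, List.range_succ, List.map_append, List.map_singleton,
        List.take_of_length_le (by simp), pvCnt_append_singleton,
        List.range_succ, List.map_append, List.map_singleton]
    have hmap : ∀ m ∈ List.range l.length, pvCnt ((l ++ [c]).take m) = pvCnt (l.take m) := by
      intro m hm
      rw [List.take_append_of_le_length (le_of_lt (List.mem_range.mp hm))]
    rw [List.map_congr_left hmap]
    have htk : pvCnt ((l ++ [c]).take l.length) = pvCnt l := by
      rw [List.take_append_of_le_length le_rfl, List.take_length]
    rw [htk]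

-- B's matched-column table pass, characterised
theorem pvB_core (l1 l2 : List Char) (h : l1.length = l2.length) (i j : Int) :
    ((List.range l1.length).filter
        (fun m => decide (l1.getD m ' ' ≠ '-') && decide (l2.getD m ' ' ≠ '-'))).map
      (fun m => (i + pvCnt (l1.take m), j + pvCnt (l2.take m)))
    = pvMatched (l1.zip l2) i j := by
  induction l1 generalizing l2 i j with
  | nil =>
    have : l2 = [] := by cases l2 <;> simp_all
    subst this
    simp [pvMatched]
  | cons c1 t1 ih =>
    obtain ⟨c2, t2, rfl⟩ : ∃ c2 t2, l2 = c2 :: t2 := by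
      cases l2 with
      | nil => simp at h
      | cons a b => exact ⟨a, b, rfl⟩
    have hlen : t1.length = t2.length := by simpa using h
    simp only [List.length_cons, List.range_succ_eq_map]
    have hcomp :
        ((List.range t1.length).map Nat.succ).filter
          (fun m => decide ((c1 :: t1).getD m ' ' ≠ '-') && decide ((c2 :: t2).getD m ' ' ≠ '-'))
        = ((List.range t1.length).filter
            (fun m => decide (t1.getD m ' ' ≠ '-') && decide (t2.getD m ' ' ≠ '-'))).map Nat.succ := by
      rw [List.filter_map]
      rfl
    have hF : ∀ (i' j' : Int) (Y : List ℕ),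
        (Y.map Nat.succ).map (fun m => (i' + pvCnt ((c1 :: t1).take m), j' + pvCnt ((c2 :: t2).take m)))
        = Y.map (fun m => ((i' + (if c1 ≠ '-' then 1 else 0)) + pvCnt (t1.take m),
                           (j' + (if c2 ≠ '-' then 1 else 0)) + pvCnt (t2.take m))) := by
      intro i' j' Y
      rw [List.map_map]
      apply List.map_congr_left
      intro m _
      simp only [Function.comp, List.take_succ_cons, pvCnt_cons, Prod.mk.injEq]
      constructor <;> ring
    simp only [List.zip_cons_cons, pvMatched]
    by_cases hc1 : c1 = '-' <;> by_cases hc2 : c2 = '-'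
    · subst hc1; subst hc2
      rw [List.filter_cons_of_neg (by simp), hcomp, hF]
      have hfix : (fun m => ((i + if ('-' : Char) ≠ '-' then (1:Int) else 0) + pvCnt (t1.take m),
          (j + if ('-' : Char) ≠ '-' then (1:Int) else 0) + pvCnt (t2.take m)))
          = (fun m => (i + pvCnt (t1.take m), j + pvCnt (t2.take m))) := by
        funext m; simp
      rw [hfix, ih t2 hlen i j]
      simp
    · subst hc1
      rw [List.filter_cons_of_neg (by simp), hcomp, hF]
      have hfix : (fun m => ((i + if ('-' : Char) ≠ '-' then (1:Int) else 0) + pvCnt (t1.take m),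
          (j + if c2 ≠ '-' then (1:Int) else 0) + pvCnt (t2.take m)))
          = (fun m => (i + pvCnt (t1.take m), (j + 1) + pvCnt (t2.take m))) := by
        funext m; simp [hc2]
      rw [hfix, ih t2 hlen i (j + 1)]
      simp [hc2]
    · subst hc2
      rw [List.filter_cons_of_neg (by simp), hcomp, hF]
      have hfix : (fun m => ((i + if c1 ≠ '-' then (1:Int) else 0) + pvCnt (t1.take m),
          (j + if ('-' : Char) ≠ '-' then (1:Int) else 0) + pvCnt (t2.take m)))
          = (fun m => ((i + 1) + pvCnt (t1.take m), j + pvCnt (t2.take m))) := by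
        funext m; simp [hc1]
      rw [hfix, ih t2 hlen (i + 1) j]
      simp [hc1]
    · rw [List.filter_cons_of_pos (by simp [hc1, hc2]), List.map_cons, hcomp, hF]
      have hfix : (fun m => ((i + if c1 ≠ '-' then (1:Int) else 0) + pvCnt (t1.take m),
          (j + if c2 ≠ '-' then (1:Int) else 0) + pvCnt (t2.take m)))
          = (fun m => ((i + 1) + pvCnt (t1.take m), (j + 1) + pvCnt (t2.take m))) := by
        funext m; simp [hc1, hc2]
      rw [hfix, ih t2 hlen (i + 1) (j + 1)]
      simp [hc1, hc2, pvCnt]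

-- the main glue: both programs compute the matched-pair list and its swap
theorem pv_main (aln_seq1 aln_seq2 : String) :
    get_aln_mapping aln_seq1 aln_seq2 = get_aln_mapping_alt aln_seq1 aln_seq2 := by
  by_cases hlen : PySem.Str.len aln_seq1 = PySem.Str.len aln_seq2
  case neg =>
    unfold get_aln_mapping get_aln_mapping_alt
    rw [if_pos hlen, if_pos hlen]
  case pos =>
  simp only [get_aln_mapping, get_aln_mapping_alt]
  rw [if_neg (fun h => h hlen), if_neg (fun h => h hlen)]
  have hl : aln_seq1.toList.length = aln_seq2.toList.length := by
    have := hlen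
    rw [PySem.Str.len_eq, PySem.Str.len_eq] at this
    exact_mod_cast this
  have hz : (aln_seq1.toList.zip aln_seq2.toList).length = aln_seq1.toList.length := by
    rw [List.length_zip, hl, min_self]
  -- A side
  have hA : ((PySem.List.pyRange 0 (PySem.Str.len aln_seq1) 1).foldl
      (fun st k => pvStepA st (PySem.List.pyGetD aln_seq1.toList k ' ', PySem.List.pyGetD aln_seq2.toList k ' '))
      (0, 0, PySem.Dict.empty, PySem.Dict.empty))
      = (aln_seq1.toList.zip aln_seq2.toList).foldl pvStepA (0, 0, PySem.Dict.empty, PySem.Dict.empty) := by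
    rw [PySem.Str.len_eq,
      show ((aln_seq1.toList.length : Int)) = ((aln_seq1.toList.zip aln_seq2.toList).length : Int) by
        rw [hz]]
    rw [PySem.List.foldl_congr_mem _ _
      (fun st k => pvStepA st (PySem.List.pyGetD (aln_seq1.toList.zip aln_seq2.toList) k (' ', ' '))) _ ?_]
    · exact PySem.List.foldl_pyRange_zero_pyGetD' (aln_seq1.toList.zip aln_seq2.toList) (' ', ' ') pvStepA _
    · intro st k hk
      obtain ⟨h0, h1⟩ := (PySem.List.mem_pyRange_one).mp hk
      have h1' : k < (aln_seq1.toList.length : Int) := by rw [← hz]; exact h1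
      have h2' : k < (aln_seq2.toList.length : Int) := by rw [← hl]; exact h1'
      congr 1
      rw [PySem.List.pyGetD_eq_getElem _ (' ', ' ') h0 h1,
          PySem.List.pyGetD_eq_getElem _ ' ' h0 h1',
          PySem.List.pyGetD_eq_getElem _ ' ' h0 h2']
      exact (List.getElem_zip).symm
  obtain ⟨eA1, eA2⟩ := pvA_items (aln_seq1.toList.zip aln_seq2.toList) 0 0 PySem.Dict.empty PySem.Dict.empty
    (by simp) (by simp) (by simp) (by simp)
  rw [hA, eA1, eA2]
  -- B side
  have hcols : (PySem.List.pyRange 0 (PySem.Str.len aln_seq1) 1).filter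
      (fun k => decide (PySem.List.pyGetD aln_seq1.toList k ' ' ≠ '-') && decide (PySem.List.pyGetD aln_seq2.toList k ' ' ≠ '-'))
      = ((List.range aln_seq1.toList.length).filter
          (fun m => decide (aln_seq1.toList.getD m ' ' ≠ '-') && decide (aln_seq2.toList.getD m ' ' ≠ '-'))).map
        (fun m : ℕ => (m : Int)) := by
    rw [PySem.Str.len_eq, PySem.List.pyRange_zero_nat, List.filter_map]
    have hpred : ((fun k => decide (PySem.List.pyGetD aln_seq1.toList k ' ' ≠ '-') &&
        decide (PySem.List.pyGetD aln_seq2.toList k ' ' ≠ '-')) ∘ (fun m : ℕ => (m : Int)))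
        = (fun m => decide (aln_seq1.toList.getD m ' ' ≠ '-') && decide (aln_seq2.toList.getD m ' ' ≠ '-')) := by
      funext m
      simp [PySem.List.pyGetD_natCast]
    rw [hpred]
  rw [hcols, List.foldl_map, List.foldl_map]
  have hmem : ∀ m ∈ (List.range aln_seq1.toList.length).filter
      (fun m => decide (aln_seq1.toList.getD m ' ' ≠ '-') && decide (aln_seq2.toList.getD m ' ' ≠ '-')),
      m < aln_seq1.toList.length + 1 ∧ m < aln_seq2.toList.length + 1 := by
    intro m hm
    have := List.mem_range.mp (List.mem_filter.mp hm).1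
    omega
  have hbd : ∀ (acc : PySem.Dict Int Int), ∀ m ∈ (List.range aln_seq1.toList.length).filter
      (fun m => decide (aln_seq1.toList.getD m ' ' ≠ '-') && decide (aln_seq2.toList.getD m ' ' ≠ '-')),
      acc.insert (PySem.List.pyGetD (pvPrefixCounts aln_seq1.toList) (m : Int) 0)
        (PySem.List.pyGetD (pvPrefixCounts aln_seq2.toList) (m : Int) 0)
      = acc.insert (pvCnt (aln_seq1.toList.take m)) (pvCnt (aln_seq2.toList.take m)) := by
    intro acc m hm
    obtain ⟨hm1, hm2⟩ := hmem m hm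
    rw [pvPrefixCounts_eq, pvPrefixCounts_eq, PySem.List.pyGetD_natCast, PySem.List.pyGetD_natCast,
        PySem.List.getD_map_range _ _ _ _ hm1, PySem.List.getD_map_range _ _ _ _ hm2]
  have hbd2 : ∀ (acc : PySem.Dict Int Int), ∀ m ∈ (List.range aln_seq1.toList.length).filter
      (fun m => decide (aln_seq1.toList.getD m ' ' ≠ '-') && decide (aln_seq2.toList.getD m ' ' ≠ '-')),
      acc.insert (PySem.List.pyGetD (pvPrefixCounts aln_seq2.toList) (m : Int) 0)
        (PySem.List.pyGetD (pvPrefixCounts aln_seq1.toList) (m : Int) 0)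
      = acc.insert (pvCnt (aln_seq2.toList.take m)) (pvCnt (aln_seq1.toList.take m)) := by
    intro acc m hm
    obtain ⟨hm1, hm2⟩ := hmem m hm
    rw [pvPrefixCounts_eq, pvPrefixCounts_eq, PySem.List.pyGetD_natCast, PySem.List.pyGetD_natCast,
        PySem.List.getD_map_range _ _ _ _ hm1, PySem.List.getD_map_range _ _ _ _ hm2]
  rw [PySem.List.foldl_congr_mem _ _
    (fun (acc : PySem.Dict Int Int) m => acc.insert (pvCnt (aln_seq1.toList.take m)) (pvCnt (aln_seq2.toList.take m))) _ hbd]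
  rw [PySem.List.foldl_congr_mem _ _
    (fun (acc : PySem.Dict Int Int) m => acc.insert (pvCnt (aln_seq2.toList.take m)) (pvCnt (aln_seq1.toList.take m))) _ hbd2]
  have hpair : ((List.range aln_seq1.toList.length).filter
      (fun m => decide (aln_seq1.toList.getD m ' ' ≠ '-') && decide (aln_seq2.toList.getD m ' ' ≠ '-'))).map
      (fun m => (pvCnt (aln_seq1.toList.take m), pvCnt (aln_seq2.toList.take m)))
      = pvMatched (aln_seq1.toList.zip aln_seq2.toList) 0 0 := by
    have := pvB_core aln_seq1.toList aln_seq2.toList hl 0 0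
    simp only [zero_add] at this
    exact this
  have hpair2 : ((List.range aln_seq1.toList.length).filter
      (fun m => decide (aln_seq1.toList.getD m ' ' ≠ '-') && decide (aln_seq2.toList.getD m ' ' ≠ '-'))).map
      (fun m => (pvCnt (aln_seq2.toList.take m), pvCnt (aln_seq1.toList.take m)))
      = (pvMatched (aln_seq1.toList.zip aln_seq2.toList) 0 0).map (fun p => (p.2, p.1)) := by
    rw [← hpair, List.map_map]
    rfl
  have hpw := pvMatched_pairwise (aln_seq1.toList.zip aln_seq2.toList) 0 0
  have hnod1 : (((List.range aln_seq1.toList.length).filter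
      (fun m => decide (aln_seq1.toList.getD m ' ' ≠ '-') && decide (aln_seq2.toList.getD m ' ' ≠ '-'))).map
      (fun m => pvCnt (aln_seq1.toList.take m))).Nodup := by
    have h1 : ((List.range aln_seq1.toList.length).filter
        (fun m => decide (aln_seq1.toList.getD m ' ' ≠ '-') && decide (aln_seq2.toList.getD m ' ' ≠ '-'))).map
        (fun m => pvCnt (aln_seq1.toList.take m))
        = (pvMatched (aln_seq1.toList.zip aln_seq2.toList) 0 0).map Prod.fst := by
      rw [← hpair, List.map_map]
      rfl
    rw [h1]
    exact List.pairwise_map.mpr (hpw.imp (fun h => ne_of_lt h.1))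
  have hnod2 : (((List.range aln_seq1.toList.length).filter
      (fun m => decide (aln_seq1.toList.getD m ' ' ≠ '-') && decide (aln_seq2.toList.getD m ' ' ≠ '-'))).map
      (fun m => pvCnt (aln_seq2.toList.take m))).Nodup := by
    have h2 : ((List.range aln_seq1.toList.length).filter
        (fun m => decide (aln_seq1.toList.getD m ' ' ≠ '-') && decide (aln_seq2.toList.getD m ' ' ≠ '-'))).map
        (fun m => pvCnt (aln_seq2.toList.take m))
        = (pvMatched (aln_seq1.toList.zip aln_seq2.toList) 0 0).map Prod.snd := by
      rw [← hpair, List.map_map]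
      rfl
    rw [h2]
    exact List.pairwise_map.mpr (hpw.imp (fun h => ne_of_lt h.2))
  rw [PySem.Dict.items_foldl_insert_fresh _ _ _ _ (by simp) hnod1,
      PySem.Dict.items_foldl_insert_fresh _ _ _ _ (by simp) hnod2]
  rw [hpair, hpair2]

-- ===== VERDICT (by name: the statement is the Claim_ definition above) =====
theorem get_aln_mapping_spec : Claim_equal_get_aln_mapping := by
  intro aln_seq1 aln_seq2 _
  unfold Spec_get_aln_mapping
  exact pv_main aln_seq1 aln_seq2
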